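-- pv_equiv track=rewrite | github.com/nstephenh/BSCopy | read_from_pdf.py | get_page_heatmap
-- ===== SOURCE A (Python) =====
-- def get_page_heatmap(page):
--     heatmap = []
--     for line in page.split('\n'):
--         char_index = 0
--         last_char_was_space = False
--         for character in line:
--             # Populate empty slots in the heatmap
--             if len(heatmap) == char_index:
--                 heatmap.append(0)
--             if character == " ":
--                 if last_char_was_space:
--                     heatmap[char_index] += 1
--                 last_char_was_space = True
--             else:
--                 last_char_was_space = False
--             char_index += 1
--     return heatmap
-- ===== SOURCE B (Python) =====
-- def get_page_heatmap(page):
--     # Column-major recount: for each column i, count the lines whose two-character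
--     # slice ending at i is a double space; column 0 can never be incremented.
--     lines = page.split('\n')
--     width = max(len(line) for line in lines)
--     return [sum(line[i - 1:i + 1] == '  ' for line in lines) if i > 0 else 0
--             for i in range(width)]
-- ===== Notes on version B (the rewrite author's own statement) =====
-- stated objective: alternative
-- what changed: Replaces A's row-major single-pass state machine (last_char_was_space flag, grow-the-list appends, in-place increments) by a column-major recomputation: the width is the maximum line length and each column's value is computed independently as the count of lines whose two-character slice ending at that column is a double space, with no mutable heatmap at all.
import Mathlib
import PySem

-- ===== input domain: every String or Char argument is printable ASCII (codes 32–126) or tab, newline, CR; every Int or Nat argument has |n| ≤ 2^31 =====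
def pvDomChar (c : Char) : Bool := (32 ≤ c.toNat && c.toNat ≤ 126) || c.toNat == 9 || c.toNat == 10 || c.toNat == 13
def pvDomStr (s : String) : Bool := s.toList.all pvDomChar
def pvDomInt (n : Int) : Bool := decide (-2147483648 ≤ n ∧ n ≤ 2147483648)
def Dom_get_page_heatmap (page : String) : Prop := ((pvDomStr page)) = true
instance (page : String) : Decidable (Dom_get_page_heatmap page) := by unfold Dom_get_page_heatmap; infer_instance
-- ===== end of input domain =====

-- B replaces A's row-major single-pass state machine (flag + grow-as-you-go appends and
-- in-place increments) by a column-major recomputation: each column is the count of lines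
-- whose two-character slice ending there is a double space; objective: alternative.

-- ===== PORT A =====
-- inner-loop step: state = (heatmap, char_index, last_char_was_space).
-- char_index is a counter that starts at 0 and only increments, so Nat is exact;
-- `heatmap[char_index] += 1` is List.modify: char_index < len(heatmap) always holds there
-- (the append branch just ran), so Python never raises and modify is exact.
def pvStepA (s : List Int × Nat × Bool) (character : Char) : List Int × Nat × Bool :=
  let h := if s.1.length = s.2.1 then s.1 ++ [0] else s.1
  if character = ' ' then
    (if s.2.2 then h.modify s.2.1 (· + 1) else h, s.2.1 + 1, true)
  else
    (h, s.2.1 + 1, false)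

def get_page_heatmap (page : String) : List Int :=
  (PySem.Chars.splitOn page.toList ['\n']).foldl
    (fun heatmap line => (line.foldl pvStepA (heatmap, 0, false)).1) []

-- ===== PORT B =====
-- `max(len(line) for line in lines)`: lengths are Nats, so the running max from 0 is the
-- generator max exactly (split always yields at least one piece, so Python's max never raises);
-- `range(width)` over that nonnegative width is List.range; `sum(bool for line in lines)` is
-- the sum of the mapped 0/1 values; `line[i-1:i+1] == '  '` is PySem.List.slice compared to
-- [' ', ' '] (only evaluated when i > 0, as in Source B).
def get_page_heatmap_alt (page : String) : List Int :=
  let lines := PySem.Chars.splitOn page.toList ['\n']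
  let width := lines.foldl (fun m l => max m l.length) 0
  (List.range width).map (fun (i : Nat) =>
    if 0 < i then
      (lines.map (fun line =>
        if PySem.List.slice line (some ((i : Int) - 1)) (some ((i : Int) + 1)) = [' ', ' ']
        then (1 : Int) else 0)).sum
    else 0)

-- ===== PRECONDITION & SPEC =====
def Spec_get_page_heatmap (page : String) (out : List Int) : Prop := out = get_page_heatmap_alt page
instance (page : String) (out : List Int) : Decidable (Spec_get_page_heatmap page out) := by unfold Spec_get_page_heatmap; infer_instance

-- ===== CLAIM (what is proved, stated in full; the proofs are below) =====
def Claim_equal_get_page_heatmap : Prop := ∀ (page : String), Dom_get_page_heatmap page → Spec_get_page_heatmap page (get_page_heatmap page)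

-- ===== LEMMAS AND PROOFS =====

-- pad a heatmap with zeros up to length M
def pvPad (h : List Int) (M : Nat) : List Int := h ++ List.replicate (M - h.length) 0

-- reference form of one line's contribution: walk the line with an explicit
-- (index, previous-char-was-space) state, bumping index ci when flag ∧ c = ' '
def pvGen (g : List Int) (line : List Char) (ci : Nat) (flag : Bool) : List Int :=
  match line with
  | [] => g
  | c :: rest => pvGen (if c = ' ' ∧ flag = true then g.modify ci (· + 1) else g) rest (ci + 1) (c = ' ')

-- how much pvGen adds at position j
def pvContrib (line : List Char) (ci : Nat) (flag : Bool) (j : Nat) : Int :=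
  match line with
  | [] => 0
  | c :: rest => (if j = ci ∧ c = ' ' ∧ flag = true then 1 else 0) + pvContrib rest (ci + 1) (c = ' ') j

theorem pvModify_append (l t : List Int) (i : Nat) (f : Int → Int) (h : i < l.length) :
    (l ++ t).modify i f = l.modify i f ++ t := by
  simp [List.modify_eq_set_getElem?, List.getElem?_append_left h, List.set_append_left _ _ h,
    List.getElem?_eq_getElem h]

-- length of A's heatmap after one line
theorem pvStepA_len (line : List Char) : ∀ (h : List Int) (ci : Nat) (flag : Bool), ci ≤ h.length →
    ((line.foldl pvStepA (h, ci, flag)).1).length = max h.length (ci + line.length) := by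
  induction line with
  | nil => intro h ci flag hle; simp; omega
  | cons c rest ih =>
    intro h ci flag hle
    simp only [List.foldl_cons, pvStepA]
    by_cases hb : h.length = ci <;> by_cases hc : c = ' ' <;> by_cases hf : flag <;>
      simp only [hb, hc, hf, if_false, if_pos] <;>
      rw [ih] <;> simp [List.length_modify] <;> omega

-- main inner-loop lemma: A on one line, padded to M, is pvGen on the padded heatmap
theorem pvInner_eq (line : List Char) : ∀ (h : List Int) (ci : Nat) (flag : Bool) (M : Nat),
    ci ≤ h.length → h.length ≤ M → ci + line.length ≤ M →
    pvPad ((line.foldl pvStepA (h, ci, flag)).1) M = pvGen (pvPad h M) line ci flag := by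
  induction line with
  | nil => intro h ci flag M _ _ _; simp [pvGen]
  | cons c rest ih =>
    intro h ci flag M hci hhM hlen
    simp only [List.foldl_cons, pvStepA, pvGen, List.length_cons] at *
    set h1 : List Int := if h.length = ci then h ++ [0] else h with hh1
    have hlen1 : ci + 1 ≤ h1.length ∧ h1.length ≤ M := by
      by_cases hb : h.length = ci <;> simp [hh1, hb] <;> omega
    have hpad1 : pvPad h1 M = pvPad h M := by
      by_cases hb : h.length = ci
      · have hciM : ci < M := by omega
        simp only [hh1, hb, if_true, pvPad, List.length_append, List.length_cons,
          List.length_nil, List.append_assoc, List.cons_append, List.nil_append]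
        congr 1
        rw [show M - ci = (M - (ci + (0 + 1))) + 1 by omega, List.replicate_succ]
      · simp [hh1, hb]
    have hmod : ∀ hh : List Int, ci < hh.length → hh.length ≤ M →
        pvPad (hh.modify ci (· + 1)) M = (pvPad hh M).modify ci (· + 1) := by
      intro hh hlt _
      simp only [pvPad, List.length_modify]
      rw [pvModify_append _ _ _ _ hlt]
    by_cases hc : c = ' ' <;> cases flag <;>
      simp only [hc, decide_true, decide_false, if_true, if_false,
        true_and, false_and, Bool.false_eq_true]
    · -- c = ' ', flag = false
      rw [ih _ _ _ _ (by omega) (by omega) (by omega), hpad1]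
    · -- c = ' ', flag = true
      rw [ih _ _ _ _ (by simp [List.length_modify]; omega) (by simp [List.length_modify]; omega) (by omega),
        hmod h1 (by omega) (by omega), hpad1]
    · -- c ≠ ' ', flag = false
      rw [ih _ _ _ _ (by omega) (by omega) (by omega), hpad1]
    · -- c ≠ ' ', flag = true
      rw [ih _ _ _ _ (by omega) (by omega) (by omega), hpad1]

-- outer loop: fold over the lines
theorem pvOuter_eq (lines : List (List Char)) : ∀ (h : List Int) (M : Nat),
    h.length ≤ M → (∀ l ∈ lines, l.length ≤ M) →
    lines.foldl (fun g l => pvGen g l 0 false) (pvPad h M)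
      = pvPad (lines.foldl (fun heatmap line => (line.foldl pvStepA (heatmap, 0, false)).1) h) M := by
  induction lines with
  | nil => intro h M _ _; simp
  | cons line rest ih =>
    intro line0 M hhM hall
    simp only [List.foldl_cons]
    rw [← pvInner_eq line line0 0 false M (by omega) hhM (by simpa using hall line (by simp)),
      ih _ M (by rw [pvStepA_len line line0 0 false (by omega)]; simp; exact ⟨hhM, by simpa using hall line (by simp)⟩)
        (fun l hl => hall l (by simp [hl]))]

theorem pvFoldMax_len (lines : List (List Char)) : ∀ (h : List Int),
    (lines.foldl (fun heatmap line => (line.foldl pvStepA (heatmap, 0, false)).1) h).length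
      = lines.foldl (fun m l => max m l.length) h.length := by
  induction lines with
  | nil => intro h; rfl
  | cons line rest ih =>
    intro h
    simp only [List.foldl_cons, ih, pvStepA_len line h 0 false (by omega)]
    congr 1
    omega

-- pvGen preserves length
theorem pvGen_len (line : List Char) : ∀ (g : List Int) (ci : Nat) (flag : Bool),
    (pvGen g line ci flag).length = g.length := by
  induction line with
  | nil => intro g ci flag; rfl
  | cons c rest ih =>
    intro g ci flag
    simp only [pvGen, ih]
    split <;> simp [List.length_modify]

-- pointwise value of pvGen
theorem pvGen_get (line : List Char) : ∀ (g : List Int) (ci : Nat) (flag : Bool) (j : Nat)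
    (hj : j < g.length),
    (pvGen g line ci flag)[j]'(by rw [pvGen_len]; exact hj) = g[j] + pvContrib line ci flag j := by
  induction line with
  | nil => intro g ci flag j hj; simp [pvGen, pvContrib]
  | cons c rest ih =>
    intro g ci flag j hj
    simp only [pvGen, pvContrib]
    by_cases hc : c = ' ' ∧ flag = true
    · simp only [if_pos hc]
      rw [ih _ _ _ j (by simp [List.length_modify]; exact hj),
        List.getElem_modify (· + 1) ci g j (by simp [List.length_modify]; exact hj)]
      by_cases hjc : j = ci
      · simp [hjc, hc.1, hc.2]; ring
      · rw [if_neg (fun h => hjc h.symm), if_neg (by tauto)]; ring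
    · simp only [if_neg hc]
      rw [if_neg (show ¬ (j = ci ∧ c = ' ' ∧ flag = true) from fun h => hc ⟨h.2.1, h.2.2⟩)]
      simp only [ih g (ci + 1) (decide (c = ' ')) j hj]
      ring

-- pvContrib with a one-step-advanced index, characterised by the two chars at physical
-- positions j-i-1 and j-i of the line (prev is the char at relative position 0)
theorem pvContrib_tail (rest : List Char) : ∀ (prev : Char) (i j : Nat),
    pvContrib rest (i + 1) (prev = ' ') j =
      if i + 1 ≤ j ∧ (prev :: rest)[j - i - 1]? = some ' ' ∧ (prev :: rest)[j - i]? = some ' '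
      then 1 else 0 := by
  induction rest with
  | nil =>
    intro prev i j
    rw [eq_comm, pvContrib]
    rw [if_neg]
    rintro ⟨h1, _, h3⟩
    rw [show j - i = (j - i - 1) + 1 by omega] at h3
    simp at h3
  | cons c rest ih =>
    intro prev i j
    simp only [pvContrib, ih c (i + 1) j]
    by_cases h0 : j = i + 1
    · subst h0
      have n1 : ¬ (i + 1 + 1 ≤ i + 1 ∧ (c :: rest)[i + 1 - (i + 1) - 1]? = some ' ' ∧
          (c :: rest)[i + 1 - (i + 1)]? = some ' ') := by rintro ⟨h1, _, _⟩; omega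
      rw [if_neg n1]
      simp only [show i + 1 - i = 1 by omega,
        List.getElem?_cons_zero, List.getElem?_cons_succ, Option.some.injEq]
      by_cases hc : c = ' ' <;> by_cases hp : prev = ' ' <;>
        simp [hc, hp]
    · rw [if_neg (show ¬ (j = i + 1 ∧ c = ' ' ∧ decide (prev = ' ') = true) from
          fun h => h0 h.1), zero_add]
      by_cases hge : i + 2 ≤ j
      · have e1 : j - i - 1 = (j - (i + 1) - 1) + 1 := by omega
        have e2 : j - i = (j - (i + 1)) + 1 := by omega
        rw [e1, e2]
        simp only [List.getElem?_cons_succ]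
        congr 1
        apply propext
        constructor
        · rintro ⟨_, h2, h3⟩; exact ⟨by omega, h2, h3⟩
        · rintro ⟨_, h2, h3⟩; exact ⟨by omega, h2, h3⟩
      · have n1 : ¬ (i + 1 + 1 ≤ j ∧ (c :: rest)[j - (i + 1) - 1]? = some ' ' ∧
            (c :: rest)[j - (i + 1)]? = some ' ') := by rintro ⟨h1, _, _⟩; omega
        have n2 : ¬ (i + 1 ≤ j ∧ (prev :: c :: rest)[j - i - 1]? = some ' ' ∧
            (prev :: c :: rest)[j - i]? = some ' ') := by rintro ⟨h1, _, _⟩; omega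
        rw [if_neg n1, if_neg n2]

-- one full line, started the way A starts it (index 0, flag false)
theorem pvContrib_line (l : List Char) (j : Nat) :
    pvContrib l 0 false j =
      if 1 ≤ j ∧ l[j - 1]? = some ' ' ∧ l[j]? = some ' ' then 1 else 0 := by
  cases l with
  | nil => simp [pvContrib]
  | cons c rest =>
    rw [pvContrib, if_neg (by simp), zero_add]
    have := pvContrib_tail rest c 0 j
    simpa using this

-- B's slice test, for a positive column index, is exactly the two-char condition
theorem pvSlice_pair (l : List Char) (i : Nat) (hi : 0 < i) :
    (PySem.List.slice l (some ((i : Int) - 1)) (some ((i : Int) + 1)) = [' ', ' ']) ↔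
      (l[i - 1]? = some ' ' ∧ l[i]? = some ' ') := by
  have e1 : (i : Int) - 1 = ((i - 1 : Nat) : Int) := by omega
  have e2 : (i : Int) + 1 = ((i + 1 : Nat) : Int) := by omega
  rw [e1, e2, PySem.List.slice_natCast, show i + 1 - (i - 1) = 2 by omega]
  have h0 : (l.drop (i - 1))[0]? = l[i - 1]? := by simp [List.getElem?_drop]
  have h1 : (l.drop (i - 1))[1]? = l[i]? := by
    rw [List.getElem?_drop, show i - 1 + 1 = i by omega]
  rw [← h0, ← h1]
  cases hd : l.drop (i - 1) with
  | nil => simp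
  | cons x t =>
    cases t with
    | nil => simp
    | cons y t' => simp [List.take_succ_cons, and_comm]

-- the column-j contribution is zero at column 0
theorem pvContrib_zero (l : List Char) : pvContrib l 0 false 0 = 0 := by
  rw [pvContrib_line]
  simp

-- fold of pvGen over lines: length and pointwise value
theorem pvFoldGen_len (lines : List (List Char)) : ∀ (g : List Int),
    (lines.foldl (fun g l => pvGen g l 0 false) g).length = g.length := by
  induction lines with
  | nil => intro g; rfl
  | cons l rest ih => intro g; simp [List.foldl_cons, ih, pvGen_len]

theorem pvFoldGen_get (lines : List (List Char)) : ∀ (g : List Int) (j : Nat) (hj : j < g.length),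
    (lines.foldl (fun g l => pvGen g l 0 false) g)[j]'(by rw [pvFoldGen_len]; exact hj)
      = g[j] + (lines.map (fun l => pvContrib l 0 false j)).sum := by
  induction lines with
  | nil => intro g j hj; simp
  | cons l rest ih =>
    intro g j hj
    simp only [List.foldl_cons, List.map_cons, List.sum_cons]
    rw [ih _ j (by rw [pvGen_len]; exact hj), pvGen_get l g 0 false j hj]
    ring

theorem pvFoldMax_le (lines : List (List Char)) : ∀ b : Nat, b ≤ lines.foldl (fun m l => max m l.length) b := by
  induction lines with
  | nil => intro b; simp
  | cons y ys ih => intro b; exact le_trans (le_max_left b y.length) (ih _)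

theorem pvLe_foldMax (lines : List (List Char)) : ∀ (b : Nat) (l : List Char), l ∈ lines →
    l.length ≤ lines.foldl (fun m l => max m l.length) b := by
  induction lines with
  | nil => intro b l hl; simp at hl
  | cons x rest ih =>
    intro b l hl
    rcases List.mem_cons.mp hl with h | h
    · subst h
      exact le_trans (le_max_right b l.length) (pvFoldMax_le rest _)
    · exact ih _ l h

-- ===== VERDICT (by name: the statement is the Claim_ definition above) =====
theorem get_page_heatmap_spec : Claim_equal_get_page_heatmap := by
  intro page _
  unfold Spec_get_page_heatmap
  have halt : get_page_heatmap_alt page = (fun lines =>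
      (List.range (lines.foldl (fun m l => max m l.length) 0)).map (fun (i : Nat) =>
        if 0 < i then
          (lines.map (fun line =>
            if PySem.List.slice line (some ((i : Int) - 1)) (some ((i : Int) + 1)) = [' ', ' ']
            then (1 : Int) else 0)).sum
        else 0)) (PySem.Chars.splitOn page.toList ['\n']) := rfl
  rw [halt]
  unfold get_page_heatmap
  generalize PySem.Chars.splitOn page.toList ['\n'] = lines
  simp only
  set W := lines.foldl (fun m l => max m l.length) 0 with hW
  set ares := lines.foldl (fun heatmap line => (line.foldl pvStepA (heatmap, 0, false)).1) ([] : List Int) with hares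
  have hlenA : ares.length = W := by rw [hares, pvFoldMax_len]; rfl
  have hpadA : pvPad ares W = ares := by simp [pvPad, hlenA]
  have hpad0 : pvPad [] W = List.replicate W (0 : Int) := by simp [pvPad]
  have hA : ares = lines.foldl (fun g l => pvGen g l 0 false) (List.replicate W (0 : Int)) := by
    rw [← hpad0, pvOuter_eq lines [] W (by simp) (fun l hl => pvLe_foldMax lines 0 l hl), hpadA]
  apply List.ext_getElem
  · simp [hlenA]
  · intro j hj1 hj2
    have hjW : j < W := by rw [← hlenA]; exact hj1
    have hjW' : j < (List.replicate W (0 : Int)).length := by simpa using hjW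
    rw [List.getElem_map, List.getElem_range]
    have hAj : ares[j]'hj1 = (lines.map (fun l => pvContrib l 0 false j)).sum := by
      have := pvFoldGen_get lines (List.replicate W (0 : Int)) j hjW'
      rw [List.getElem_replicate, zero_add] at this
      rw [← this]
      congr 1
    rw [hAj]
    by_cases hj0 : 0 < j
    · rw [if_pos hj0]
      congr 1
      apply List.map_congr_left
      intro l _
      rw [pvContrib_line]
      by_cases hcond : l[j - 1]? = some ' ' ∧ l[j]? = some ' '
      · rw [if_pos ⟨by omega, hcond.1, hcond.2⟩, if_pos ((pvSlice_pair l j hj0).mpr hcond)]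
      · rw [if_neg (by tauto), if_neg (fun h => hcond ((pvSlice_pair l j hj0).mp h))]
    · rw [if_neg hj0]
      apply List.sum_eq_zero
      intro x hx
      rcases List.mem_map.mp hx with ⟨l, _, hl⟩
      rw [← hl, show j = 0 by omega, pvContrib_zero]
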